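-- pv_equiv track=rewrite | github.com/pypi-data/pypi-mirror-403 | packages/kontra/kontra-0.6.0.tar.gz/kontra-0.6.0/src/kontra/engine/paths.py | _has_file_extension
-- ===== SOURCE A (Python) =====
-- def _has_file_extension(uri: str) -> bool:
--     """Check if URI has a known data file extension."""
--     extensions = (
--         ".parquet", ".pq",
--         ".csv", ".tsv",
--         ".json", ".ndjson", ".jsonl",
--         ".arrow", ".feather", ".ipc",
--     )
--     return any(uri.endswith(ext) for ext in extensions)
-- ===== SOURCE B (Python) =====
-- _DATA_EXTS = {"parquet", "pq", "csv", "tsv", "json", "ndjson", "jsonl",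
--               "arrow", "feather", "ipc"}
--
--
-- def _has_file_extension(uri: str) -> bool:
--     """Check if URI has a known data file extension."""
--     parts = uri.rsplit(".", 1)
--     return len(parts) == 2 and parts[1] in _DATA_EXTS
-- ===== Notes on version B (the rewrite author's own statement) =====
-- stated objective: idiomatic
-- what changed: Replaces the ten endswith suffix scans with a single rsplit on the last dot plus one set-membership test on the bare extension name.
import Mathlib
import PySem

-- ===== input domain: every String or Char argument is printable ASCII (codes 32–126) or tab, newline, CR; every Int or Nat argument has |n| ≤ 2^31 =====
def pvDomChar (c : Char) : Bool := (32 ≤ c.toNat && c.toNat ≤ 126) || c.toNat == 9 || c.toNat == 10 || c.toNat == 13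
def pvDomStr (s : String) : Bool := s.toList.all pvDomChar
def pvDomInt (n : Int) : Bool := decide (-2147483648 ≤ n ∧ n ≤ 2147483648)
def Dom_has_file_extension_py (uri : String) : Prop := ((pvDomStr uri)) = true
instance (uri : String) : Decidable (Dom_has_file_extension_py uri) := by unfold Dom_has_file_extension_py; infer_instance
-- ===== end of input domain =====

-- B replaces A's ten endswith suffix scans by one split on the last dot plus a set-membership
-- test of the bare extension name (idiomatic; same result on every string).


-- ===== PORT A =====
-- A: any(uri.endswith(ext) for ext in extensions), extensions a tuple of dotted suffixes
def has_file_extension_py (uri : String) : Bool :=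
  [".parquet", ".pq", ".csv", ".tsv", ".json", ".ndjson", ".jsonl",
   ".arrow", ".feather", ".ipc"].any (fun ext => PySem.Str.endswith uri ext)

-- ===== PORT B =====
-- B's set of bare extension names (without the leading dot)
def pvDataExts : List (List Char) :=
  ["parquet", "pq", "csv", "tsv", "json", "ndjson", "jsonl",
   "arrow", "feather", "ipc"].map String.toList

-- uri.rsplit('.', 1): ported by hand (PySem has no rsplit); exact — `none` when there is no
-- dot (Python's rsplit then yields a single part), else the segment after the LAST dot.
def pvRsplitTail? (cs : List Char) : Option (List Char) :=
  if '.' ∈ cs then some ((cs.reverse.takeWhile (· ≠ '.')).reverse) else none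

def has_file_extension_py_alt (uri : String) : Bool :=
  match pvRsplitTail? uri.toList with
  | none => false
  | some tail => pvDataExts.contains tail

-- ===== PRECONDITION & SPEC =====
def Spec_has_file_extension_py (uri : String) (out : Bool) : Prop := out = has_file_extension_py_alt uri
instance (uri : String) (out : Bool) : Decidable (Spec_has_file_extension_py uri out) := by unfold Spec_has_file_extension_py; infer_instance

-- ===== CLAIM (what is proved, stated in full; the proofs are below) =====
def Claim_equal_has_file_extension_py : Prop := ∀ (uri : String), Dom_has_file_extension_py uri → Spec_has_file_extension_py uri (has_file_extension_py uri)

-- ===== LEMMAS AND PROOFS =====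

-- On the reversed character list: the reversed dotted suffix (t ++ ['.']) is a prefix of r
-- iff r contains a dot and the run before r's first dot is exactly t (t itself dot-free).
lemma pv_dropWhile_head_false {α : Type} (p : α → Bool) :
    ∀ (r : List α) (c : α) (d : List α), r.dropWhile p = c :: d → p c = false := by
  intro r
  induction r with
  | nil => intro c d h; simp [List.dropWhile] at h
  | cons a l ih =>
      intro c d h
      by_cases hp : p a
      · rw [List.dropWhile_cons_of_pos hp] at h
        exact ih c d h
      · rw [List.dropWhile_cons_of_neg hp] at h
        cases h
        simpa using hp

lemma prefix_dot_iff_takeWhile (t r : List Char) (ht : '.' ∉ t) :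
    (t ++ ['.']) <+: r ↔ ('.' ∈ r ∧ r.takeWhile (· ≠ '.') = t) := by
  constructor
  · rintro ⟨rest, hr⟩
    subst hr
    refine ⟨by simp, ?_⟩
    rw [List.append_assoc,
      List.takeWhile_append_of_pos (by
        intro x hx
        simp only [decide_eq_true_eq]
        intro h
        exact ht (h ▸ hx))]
    simp
  · rintro ⟨hmem, ht'⟩
    have hsplit : r.takeWhile (fun c => decide (c ≠ '.')) ++ r.dropWhile (fun c => decide (c ≠ '.')) = r :=
      List.takeWhile_append_dropWhile
    cases hcd : r.dropWhile (fun c => decide (c ≠ '.')) with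
    | nil =>
        exfalso
        have := List.dropWhile_eq_nil_iff.mp hcd '.' hmem
        simp at this
    | cons c d' =>
        have hc : c = '.' := by
          have := pv_dropWhile_head_false (fun c => decide (c ≠ '.')) r c d' hcd
          simpa using this
        exact ⟨d', by rw [← hsplit, ht', hcd, hc, List.append_assoc]; rfl⟩

-- endswith with a dotted, dot-free extension = "segment after the last dot equals the extension".
lemma endswith_dot_iff (cs e : List Char) (he : '.' ∉ e) :
    ('.' :: e) <:+ cs ↔ ('.' ∈ cs ∧ (cs.reverse.takeWhile (· ≠ '.')).reverse = e) := by
  rw [← List.reverse_prefix (l₁ := '.' :: e)]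
  simp only [List.reverse_cons]
  rw [prefix_dot_iff_takeWhile e.reverse cs.reverse (by simpa using he)]
  constructor
  · rintro ⟨h1, h2⟩
    exact ⟨by simpa using h1, by rw [h2]; simp⟩
  · rintro ⟨h1, h2⟩
    exact ⟨by simpa using h1, by rw [← h2]; simp⟩

-- generic: any-of-endswith over dotted dot-free extensions = last-dot split + membership
lemma any_endswith_eq (cs : List Char) (exts : List (List Char))
    (h : ∀ e ∈ exts, '.' ∉ e) :
    (exts.any fun e => PySem.Chars.endswith cs ('.' :: e)) =
      (if '.' ∈ cs then exts.contains ((cs.reverse.takeWhile (· ≠ '.')).reverse) else false) := by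
  by_cases hdot : '.' ∈ cs
  · simp only [hdot, if_pos]
    rw [Bool.eq_iff_iff]
    simp only [List.any_eq_true, PySem.Chars.endswith_iff, List.contains_eq_mem,
      decide_eq_true_eq]
    constructor
    · rintro ⟨e, he, hsuf⟩
      have := (endswith_dot_iff cs e (h e he)).mp hsuf
      rw [this.2]
      exact he
    · intro hmem
      refine ⟨_, hmem, (endswith_dot_iff cs _ (h _ hmem)).mpr ⟨hdot, rfl⟩⟩
  · simp only [hdot, if_neg, not_false_iff]
    rw [Bool.eq_false_iff]
    intro hany
    obtain ⟨e, _, hsuf⟩ := List.any_eq_true.mp hany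
    exact hdot (((PySem.Chars.endswith_iff _ _).mp hsuf).mem (by simp))

-- ===== VERDICT (by name: the statement is the Claim_ definition above) =====
theorem has_file_extension_py_spec : Claim_equal_has_file_extension_py := by
  intro uri _
  unfold Spec_has_file_extension_py
  have hA : has_file_extension_py uri
      = pvDataExts.any (fun e => PySem.Chars.endswith uri.toList ('.' :: e)) := by
    simp only [has_file_extension_py, pvDataExts, List.map_cons, List.map_nil,
      List.any_cons, List.any_nil, PySem.Str.endswith_eq]
    rfl
  have hB : has_file_extension_py_alt uri
      = (if '.' ∈ uri.toList then
          pvDataExts.contains ((uri.toList.reverse.takeWhile (· ≠ '.')).reverse)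
        else false) := by
    unfold has_file_extension_py_alt pvRsplitTail?
    by_cases hdot : '.' ∈ uri.toList <;> simp [hdot]
  rw [hA, hB, any_endswith_eq uri.toList pvDataExts (by decide)]
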